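-- pv_equiv track=rewrite | github.com/ryanlcason2010-pixel/BotConChatv1.1 | framework-assistant/components/framework_index_clean.py | group_frameworks_alphabetically
-- ===== SOURCE A (Python) =====
-- from typing import List, Dict, Any, Optional, Tuple
--
-- def group_frameworks_alphabetically(
--     frameworks: List[Dict[str, Any]]
-- ) -> Dict[str, List[Dict[str, Any]]]:
--     """
--     Group frameworks by first letter.
--
--     Args:
--         frameworks: List of framework dicts
--
--     Returns:
--         Dict mapping letter to list of frameworks
--     """
--     grouped = {}
--
--     for fw in frameworks:
--         name = fw.get('name', 'Unknown')
--         first_letter = name[0].upper() if name else '#'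
--
--         # Handle non-alphabetic characters
--         if not first_letter.isalpha():
--             first_letter = '#'
--
--         if first_letter not in grouped:
--             grouped[first_letter] = []
--
--         grouped[first_letter].append(fw)
--
--     # Sort frameworks within each group
--     for letter in grouped:
--         grouped[letter].sort(key=lambda x: x.get('name', '').lower())
--
--     # Return sorted by letter
--     return dict(sorted(grouped.items()))
-- ===== SOURCE B (Python) =====
-- def group_frameworks_alphabetically(frameworks):
--     def letter(fw):
--         name = fw.get('name', 'Unknown')
--         fl = name[0].upper() if name else '#'
--         return fl if fl.isalpha() else '#'
--
--     letters = sorted({letter(fw) for fw in frameworks})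
--     return {
--         c: sorted((fw for fw in frameworks if letter(fw) == c),
--                   key=lambda x: x.get('name', '').lower())
--         for c in letters
--     }
-- ===== Notes on version B (the rewrite author's own statement) =====
-- stated objective: alternative
-- what changed: B computes the sorted set of first letters once and builds the result directly by filtering and name-sorting the input per letter, instead of accumulating a dict of buckets and then sorting each bucket and the keys afterwards.
import Mathlib
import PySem

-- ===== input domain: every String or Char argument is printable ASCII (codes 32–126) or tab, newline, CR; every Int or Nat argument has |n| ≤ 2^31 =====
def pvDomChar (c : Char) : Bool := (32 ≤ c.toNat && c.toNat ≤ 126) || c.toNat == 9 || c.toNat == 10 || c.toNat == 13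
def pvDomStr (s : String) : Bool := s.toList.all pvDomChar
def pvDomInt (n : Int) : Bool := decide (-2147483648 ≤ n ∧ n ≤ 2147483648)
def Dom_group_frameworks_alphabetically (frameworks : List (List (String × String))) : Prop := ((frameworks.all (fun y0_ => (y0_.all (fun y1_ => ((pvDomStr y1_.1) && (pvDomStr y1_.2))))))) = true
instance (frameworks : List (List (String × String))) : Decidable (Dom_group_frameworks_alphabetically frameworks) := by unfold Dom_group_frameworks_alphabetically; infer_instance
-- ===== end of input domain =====

-- B groups by filtering the input once per sorted distinct letter instead of accumulating dict buckets
-- and sorting them afterwards; equal return value, no caller-visible mutation in either version.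

-- shared helper: the first-letter computation, identical lines in both Pythons
-- name[0].upper() if name else '#'; then '#' unless it is alphabetic
def pvLetter (fw : List (String × String)) : String :=
  let name := (PySem.Dict.mk fw).getD "name" "Unknown"
  let fl := match name.toList with
    | [] => "#"
    | c :: _ => String.ofList [PySem.Chars.upperChar c]
  if PySem.Str.strIsalpha fl then fl else "#"

-- shared helper: the sort key x.get('name', '').lower(), identical in both Pythons
def pvSortKey (fw : List (String × String)) : String :=
  PySem.Str.lower ((PySem.Dict.mk fw).getD "name" "")

-- ===== PORT A =====
def group_frameworks_alphabetically (frameworks : List (List (String × String))) : List (String × List (List (String × String))) :=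
  let grouped : PySem.Dict String (List (List (String × String))) :=
    frameworks.foldl (fun g fw =>
      let fl := pvLetter fw
      let g := if g.contains fl then g else g.insert fl []
      g.modify fl [] (· ++ [fw])) PySem.Dict.empty
  -- grouped[letter].sort(key=…) for each letter, then sorted(grouped.items());
  -- keys are distinct so Python's tuple comparison only ever reads the first component
  PySem.List.sorted
    (grouped.items.map (fun p => (p.1, PySem.List.sorted p.2 pvSortKey)))
    (fun p => p.1)

-- ===== PORT B =====
def group_frameworks_alphabetically_alt (frameworks : List (List (String × String))) : List (String × List (List (String × String))) :=
  let letters := PySem.List.sorted (PySem.Set.ofList (frameworks.map pvLetter)) (fun c => c)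
  letters.map (fun c =>
    (c, PySem.List.sorted (frameworks.filter (fun fw => pvLetter fw == c)) pvSortKey))

-- ===== PRECONDITION & SPEC =====
def Spec_group_frameworks_alphabetically (frameworks : List (List (String × String))) (out : List (String × List (List (String × String)))) : Prop := out = group_frameworks_alphabetically_alt frameworks
instance (frameworks : List (List (String × String))) (out : List (String × List (List (String × String)))) : Decidable (Spec_group_frameworks_alphabetically frameworks out) := by unfold Spec_group_frameworks_alphabetically; infer_instance

-- ===== CLAIM (what is proved, stated in full; the proofs are below) =====
def Claim_equal_group_frameworks_alphabetically : Prop := ∀ (frameworks : List (List (String × String))), Dom_group_frameworks_alphabetically frameworks → Spec_group_frameworks_alphabetically frameworks (group_frameworks_alphabetically frameworks)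

-- ===== LEMMAS AND PROOFS =====

-- A's "if letter not in grouped: grouped[letter] = []" followed by append is exactly modify
theorem pv_step_eq (g : PySem.Dict String (List (List (String × String)))) (k : String)
    (fw : List (String × String)) :
    (if g.contains k then g else g.insert k []).modify k [] (· ++ [fw])
      = g.modify k [] (· ++ [fw]) := by
  by_cases h : g.contains k
  · simp [h]
  · have h' : g.contains k = false := by simpa using h
    simp only [h', if_false, Bool.false_eq_true, PySem.Dict.modify,
      PySem.Dict.getD_insert_self, PySem.Dict.insert_insert_self,
      PySem.Dict.getD_of_not_contains g _ h']

theorem pv_fold_eq (l : List (List (String × String)))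
    (d : PySem.Dict String (List (List (String × String)))) :
    l.foldl (fun g fw =>
        let fl := pvLetter fw
        let g := if g.contains fl then g else g.insert fl []
        g.modify fl [] (· ++ [fw])) d
      = l.foldl (fun g fw => g.modify (pvLetter fw) [] (· ++ [fw])) d := by
  simp only [pv_step_eq]

theorem group_frameworks_alphabetically_spec_aux (l : List (List (String × String))) :
    group_frameworks_alphabetically l = group_frameworks_alphabetically_alt l := by
  simp only [group_frameworks_alphabetically, group_frameworks_alphabetically_alt]
  rw [pv_fold_eq]
  set G := l.foldl (fun g fw => g.modify (pvLetter fw) [] (· ++ [fw])) PySem.Dict.empty with hG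
  have hkeys : G.keys = PySem.Set.ofList (l.map pvLetter) := by
    rw [hG, PySem.Dict.keys_foldl_modify_key l pvLetter [] (fun _ fw => (· ++ [fw]))]
    simp [PySem.Set.update_eq_append_filter]
  have hnd : G.keys.Nodup := by
    rw [hkeys]; exact PySem.Set.nodup_ofList _
  have hgetD : ∀ c, G.getD c [] = l.filter (fun fw => pvLetter fw == c) := by
    intro c
    have h := PySem.Dict.getD_foldl_modify_append
      (l.map (fun fw => (pvLetter fw, fw))) PySem.Dict.empty c
    simp only [List.foldl_map] at h
    rw [hG, h]
    simp [List.filter_map, Function.comp_def]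
  rw [PySem.Dict.items_eq_map_keys G hnd [], hkeys, List.map_map]
  have hpair : ((fun p => (p.1, PySem.List.sorted p.2 pvSortKey)) ∘
        fun k => (k, G.getD k []))
      = fun c => (c, PySem.List.sorted (l.filter (fun fw => pvLetter fw == c)) pvSortKey) := by
    funext c; simp [Function.comp, hgetD]
  rw [hpair]
  apply PySem.List.sorted_eq_of_perm_of_pairwise_lt
  · exact List.Perm.map _ (PySem.List.sorted_perm _ _ _)
  · exact List.Pairwise.map _ (fun a b h => h)
      (PySem.List.sorted_ofList_pairwise_lt (l.map pvLetter))

-- ===== VERDICT (by name: the statement is the Claim_ definition above) =====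
theorem group_frameworks_alphabetically_spec : Claim_equal_group_frameworks_alphabetically := by
  intro l _
  unfold Spec_group_frameworks_alphabetically
  exact group_frameworks_alphabetically_spec_aux l
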